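-- pv_equiv track=rewrite | github.com/YagoRizzetti/AlgoritmosYEstructurasDeDatos1 | PrimerCuatrimestre/SegundoParcial/practica2p2.py | controlta
-- ===== SOURCE A (Python) =====
-- def controlta(x):
--     ul = ""
--     countptta = 0
--     ta = 0
--     for i in x:
--         if i == " " or i == ".":
--             if ta >= 2:
--                 countptta += 1
--             ta = 0
--             ul = ""
--         else:
--             if ul == "t" and i == "a":
--                 ta += 1
--             ul = i
--     return countptta
-- ===== SOURCE B (Python) =====
-- def controlta(x):
--     return sum(1 for w in x.replace(".", " ").split(" ")[:-1] if w.count("ta") >= 2)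
-- ===== Notes on version B (the rewrite author's own statement) =====
-- stated objective: idiomatic
-- what changed: Replaces A's per-character state machine (previous-char register plus per-word occurrence counter reset at delimiters) with an idiomatic pipeline: replace dots by spaces, split on spaces, drop the unterminated last token, and count tokens whose str.count of the pattern is at least 2.
import Mathlib
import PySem

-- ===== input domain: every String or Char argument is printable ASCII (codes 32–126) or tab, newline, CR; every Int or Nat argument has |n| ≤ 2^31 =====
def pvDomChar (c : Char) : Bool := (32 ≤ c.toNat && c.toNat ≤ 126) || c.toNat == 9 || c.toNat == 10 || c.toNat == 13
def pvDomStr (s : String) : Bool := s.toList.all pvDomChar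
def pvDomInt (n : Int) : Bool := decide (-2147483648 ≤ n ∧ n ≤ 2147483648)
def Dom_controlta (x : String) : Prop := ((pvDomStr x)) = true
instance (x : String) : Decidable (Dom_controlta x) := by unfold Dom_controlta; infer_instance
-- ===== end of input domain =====

-- B replaces A's per-character previous-char state machine by an idiomatic
-- tokenise-then-count pipeline (replace '.' by ' ', split on ' ', drop the
-- unterminated last token, count tokens containing "ta" at least twice);
-- objective: idiomatic, same asymptotic cost.

-- ===== PORT A =====
-- one step of A's for-loop; state = (ul, countptta, ta)
def controltaStep (st : List Char × Int × Int) (i : Char) : List Char × Int × Int :=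
  if i = ' ' ∨ i = '.' then
    ([], (if 2 ≤ st.2.2 then st.2.1 + 1 else st.2.1), 0)
  else
    ([i], st.2.1, (if st.1 = ['t'] ∧ i = 'a' then st.2.2 + 1 else st.2.2))

def controlta (x : String) : Int :=
  (x.toList.foldl controltaStep ([], 0, 0)).2.1

-- ===== PORT B =====
def controlta_alt (x : String) : Int :=
  ((PySem.List.slice
      (PySem.Chars.splitOn (PySem.Chars.replace x.toList ['.'] [' ']) [' '])
      none (some (-1))).countP
    (fun w => decide (2 ≤ PySem.Chars.count w ['t', 'a'])) : Nat)

-- ===== PRECONDITION & SPEC =====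
def Spec_controlta (x : String) (out : Int) : Prop := out = controlta_alt x
instance (x : String) (out : Int) : Decidable (Spec_controlta x out) := by unfold Spec_controlta; infer_instance

-- ===== CLAIM (what is proved, stated in full; the proofs are below) =====
def Claim_equal_controlta : Prop := ∀ (x : String), Dom_controlta x → Spec_controlta x (controlta x)

-- ===== LEMMAS AND PROOFS =====

-- count of "ta" occurrences in a word, given the previous character (as A's ul)
def taFrom (ul : List Char) : List Char → Nat
  | [] => 0
  | i :: t => if ul = ['t'] ∧ i = 'a' then taFrom [i] t + 1 else taFrom [i] t

-- '.' ↦ ' '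
def subDot (c : Char) : Char := if c = '.' then ' ' else c

-- split on ' ' (always returns a nonempty list of words)
def splitW : List Char → List (List Char)
  | [] => [[]]
  | c :: t =>
    if c = ' ' then [] :: splitW t
    else match splitW t with
      | w :: ws => (c :: w) :: ws
      | [] => [[c]]

def prependHead (p : List Char) : List (List Char) → List (List Char)
  | [] => [p]
  | w :: ws => (p ++ w) :: ws

-- reference count, A's traversal order, state (ul, ta)
def specGo (ul : List Char) (ta : Nat) : List Char → Int
  | [] => 0
  | i :: t =>
    if i = ' ' ∨ i = '.' then (if 2 ≤ ta then 1 else 0) + specGo [] 0 t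
    else specGo [i] (if ul = ['t'] ∧ i = 'a' then ta + 1 else ta) t

-- word-list view of specGo: the last (unterminated) word never counts
def countWords (ul : List Char) (ta : Nat) : List (List Char) → Int
  | [] => 0
  | [_] => 0
  | w :: ws => (if 2 ≤ ta + taFrom ul w then 1 else 0) + countWords [] 0 ws

theorem splitW_ne_nil (cs : List Char) : splitW cs ≠ [] := by
  cases cs with
  | nil => simp [splitW]
  | cons c t =>
    simp only [splitW]
    split
    · simp
    · split <;> simp_all

theorem taFrom_of_ne (ul : List Char) (l : List Char) (h : ul ≠ ['t']) :
    taFrom ul l = taFrom [] l := by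
  cases l with
  | nil => rfl
  | cons i t =>
    simp [taFrom, h]

-- A's fold computes specGo
theorem foldA_eq (cs : List Char) : ∀ (ul : List Char) (ta : Nat) (c : Int),
    (cs.foldl controltaStep (ul, c, (ta : Int))).2.1 = c + specGo ul ta cs := by
  induction cs with
  | nil => intro ul ta c; simp [specGo]
  | cons i t ih =>
    intro ul ta c
    by_cases hd : i = ' ' ∨ i = '.'
    · simp only [List.foldl_cons, controltaStep, hd, if_true, specGo]
      have h0 := ih [] 0 (if 2 ≤ ta then c + 1 else c)
      rw [Nat.cast_zero] at h0
      by_cases h2 : 2 ≤ ta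
      · rw [if_pos (show 2 ≤ (ta : Int) by exact_mod_cast h2)]
        rw [if_pos h2] at h0
        rw [h0, if_pos h2]; ring
      · rw [if_neg (show ¬ 2 ≤ (ta : Int) by exact_mod_cast h2)]
        rw [if_neg h2] at h0
        rw [h0, if_neg h2]; ring
    · simp only [List.foldl_cons, controltaStep, hd, if_false, specGo]
      by_cases hta : ul = ['t'] ∧ i = 'a'
      · rw [if_pos hta, if_pos hta, show ((ta : Int) + 1 = ((ta + 1 : Nat) : Int)) by push_cast; ring, ih]
      · rw [if_neg hta, if_neg hta, ih]

-- specGo over the words produced by splitW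
theorem specGo_eq_countWords (cs : List Char) : ∀ (ul : List Char) (ta : Nat),
    specGo ul ta cs = countWords ul ta (splitW (cs.map subDot)) := by
  induction cs with
  | nil => intro ul ta; simp [specGo, splitW, countWords]
  | cons i t ih =>
    intro ul ta
    by_cases hd : i = ' ' ∨ i = '.'
    · have hsub : subDot i = ' ' := by rcases hd with h | h <;> simp [subDot, h]
      simp only [specGo, hd, if_true, List.map_cons, hsub, splitW]
      rw [ih []]
      rcases hS : splitW (t.map subDot) with _ | ⟨w, ws⟩
      · exact absurd hS (splitW_ne_nil _)
      · simp [countWords, taFrom]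
    · have hi1 : i ≠ ' ' := fun h => hd (Or.inl h)
      have hi2 : i ≠ '.' := fun h => hd (Or.inr h)
      have hsub : subDot i = i := by simp [subDot, hi2]
      simp only [specGo, hd, if_false, List.map_cons, hsub, splitW, if_neg hi1]
      rw [ih [i]]
      rcases hS : splitW (t.map subDot) with _ | ⟨w, ws⟩
      · exact absurd hS (splitW_ne_nil _)
      · rcases ws with _ | ⟨w2, ws'⟩
        · simp [countWords]
        · simp only [countWords, taFrom]
          by_cases hta : ul = ['t'] ∧ i = 'a'
          · obtain ⟨h1, h2⟩ := hta
            subst h1; subst h2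
            split_ifs <;> first | rfl | (exfalso; omega)
          · simp only [if_neg hta]

theorem countWords_eq_countP (ws : List (List Char)) :
    countWords [] 0 ws =
      ((ws.dropLast.countP (fun w => decide (2 ≤ taFrom [] w)) : Nat) : Int) := by
  induction ws with
  | nil => simp [countWords]
  | cons w ws ih =>
    rcases ws with _ | ⟨w2, ws'⟩
    · simp [countWords]
    · rw [List.dropLast_cons_of_ne_nil (by simp)]
      simp only [countWords, List.countP_cons, Nat.zero_add]
      rw [ih]
      by_cases h2 : 2 ≤ taFrom [] w
      · rw [if_pos h2]; simp [h2]; ring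
      · rw [if_neg h2]; simp [h2]

-- ===== PySem library characterisations at the literal arguments B uses =====

theorem replace_go_dot (fuel : Nat) : ∀ (l acc : List Char), l.length ≤ fuel →
    PySem.Chars.replace.go ['.'] [' '] fuel l acc = acc.reverse ++ l.map subDot := by
  induction fuel with
  | zero =>
    intro l acc h
    rw [List.length_eq_zero_iff.mp (Nat.le_zero.mp h)]
    simp [PySem.Chars.replace.go]
  | succ n ih =>
    intro l acc h
    cases l with
    | nil => simp [PySem.Chars.replace.go]
    | cons c t =>
      simp only [PySem.Chars.replace.go]
      by_cases hc : c = '.'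
      · subst hc
        rw [if_pos (by simp [List.isPrefixOf])]
        rw [show List.drop (List.length ['.']) ('.' :: t) = t from rfl]
        rw [ih t _ (by simpa using Nat.lt_succ_iff.mp (by simpa using h))]
        simp [subDot]
      · rw [if_neg (by simp [List.isPrefixOf]; exact fun h2 => hc h2.symm)]
        rw [ih t _ (by simpa using Nat.lt_succ_iff.mp (by simpa using h))]
        simp [subDot, hc]

theorem replace_dot (cs : List Char) :
    PySem.Chars.replace cs ['.'] [' '] = cs.map subDot := by
  simp [PySem.Chars.replace, replace_go_dot cs.length cs [] le_rfl]

theorem splitOn_go_space (fuel : Nat) : ∀ (l cur : List Char) (acc : List (List Char)),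
    l.length < fuel →
    PySem.Chars.splitOn.go [' '] fuel l cur acc = acc.reverse ++ prependHead cur.reverse (splitW l) := by
  induction fuel with
  | zero => intro _ _ _ h; omega
  | succ n ih =>
    intro l cur acc h
    cases l with
    | nil => simp [PySem.Chars.splitOn.go, splitW, prependHead]
    | cons c t =>
      simp only [PySem.Chars.splitOn.go]
      by_cases hc : c = ' '
      · subst hc
        rw [if_pos (by simp [List.isPrefixOf])]
        rw [show List.drop (List.length [' ']) (' ' :: t) = t from rfl]
        rw [ih t [] _ (by simpa using Nat.lt_succ_iff.mp (Nat.lt_of_lt_of_le h le_rfl))]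
        simp only [splitW, List.reverse_cons, List.reverse_nil]
        rcases hS : splitW t with _ | ⟨w, ws⟩
        · exact absurd hS (splitW_ne_nil t)
        · simp [prependHead]
      · rw [if_neg (by simp [List.isPrefixOf]; exact fun h2 => hc h2.symm)]
        rw [ih t (c :: cur) acc (by simpa using Nat.lt_succ_iff.mp (Nat.lt_of_lt_of_le h le_rfl))]
        simp only [splitW, hc, if_false, List.reverse_cons]
        rcases hS : splitW t with _ | ⟨w, ws⟩
        · exact absurd hS (splitW_ne_nil t)
        · simp [prependHead]

theorem splitOn_space (cs : List Char) :
    PySem.Chars.splitOn cs [' '] = splitW cs := by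
  rw [PySem.Chars.splitOn, splitOn_go_space (cs.length + 1) cs [] [] (by omega)]
  rcases hS : splitW cs with _ | ⟨w, ws⟩
  · exact absurd hS (splitW_ne_nil cs)
  · simp [prependHead]

theorem count_go_ta (fuel : Nat) : ∀ (l : List Char) (acc : Nat), l.length ≤ fuel →
    PySem.Chars.count.go ['t', 'a'] fuel l acc = acc + taFrom [] l := by
  induction fuel with
  | zero =>
    intro l acc h
    rw [List.length_eq_zero_iff.mp (Nat.le_zero.mp h)]
    simp [PySem.Chars.count.go, taFrom]
  | succ n ih =>
    intro l acc h
    cases l with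
    | nil => simp [PySem.Chars.count.go, taFrom]
    | cons c t =>
      simp only [PySem.Chars.count.go]
      by_cases hp : List.isPrefixOf ['t', 'a'] (c :: t) = true
      · rw [if_pos hp]
        rcases t with _ | ⟨d, t'⟩
        · simp [List.isPrefixOf] at hp
        · obtain ⟨hc1, hc2⟩ : 't' = c ∧ 'a' = d := by simpa [List.isPrefixOf] using hp
          subst hc1; subst hc2
          rw [show List.drop (List.length ['t', 'a']) ('t' :: 'a' :: t') = t' from rfl]
          rw [ih t' (acc + 1) (by simp at h; omega)]
          simp only [taFrom]
          rw [if_neg (by simp), if_pos (by simp)]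
          rw [taFrom_of_ne ['a'] t' (by decide)]
          omega
      · rw [if_neg hp]
        rw [ih t acc (by simpa using Nat.lt_succ_iff.mp (by simpa using h))]
        congr 1
        cases t with
        | nil => simp [taFrom]
        | cons d t' =>
          have hcd : ¬ ([c] = ['t'] ∧ d = 'a') := by
            rintro ⟨hc, hd⟩
            simp only [List.cons.injEq, and_true] at hc
            subst hc; subst hd
            simp [List.isPrefixOf] at hp
          have h1 : taFrom [] (d :: t') = taFrom [d] t' := by
            simp only [taFrom]; rw [if_neg (by simp)]
          have h2 : taFrom [] (c :: d :: t') = taFrom [d] t' := by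
            simp only [taFrom]; rw [if_neg (by simp), if_neg hcd]
          rw [h1, h2]

theorem count_ta (w : List Char) : PySem.Chars.count w ['t', 'a'] = taFrom [] w := by
  simp [PySem.Chars.count, count_go_ta w.length w 0 le_rfl]

theorem slice_neg_one (l : List (List Char)) :
    PySem.List.slice l none (some (-1)) = l.dropLast := by
  simp [PySem.List.slice]
  rw [List.dropLast_eq_take]

-- ===== VERDICT (by name: the statement is the Claim_ definition above) =====
theorem controlta_spec : Claim_equal_controlta := by
  intro x _
  unfold Spec_controlta controlta controlta_alt
  rw [replace_dot, splitOn_space, slice_neg_one]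
  have hA := foldA_eq x.toList [] 0 0
  rw [show (((0 : Nat) : Int)) = (0 : Int) from rfl] at hA
  rw [hA, specGo_eq_countWords, countWords_eq_countP]
  simp only [zero_add]
  congr 2
  funext w
  rw [count_ta]
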